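-- pv_equiv track=rewrite | github.com/Hong9915/algorithm | Python3/프로그래머스/2/131127. 할인 행사/할인 행사.py | solution
-- ===== SOURCE A (Python) =====
-- from collections import Counter
--
-- def solution(want, number, discount):
--     answer = 0
--     target = dict(zip(want, number))
--
--     for i in range(len(discount) - 9):
--         window = discount[i:i+10]
--         window_count = Counter(window)
--         if window_count == target:
--             answer += 1
--
--     return answer
-- ===== SOURCE B (Python) =====
-- def solution(want, number, discount):
--     target = dict(zip(want, number))
--     if len(discount) < 10:
--         return 0
--     counts = {}
--     for x in discount[:10]:
--         counts[x] = counts.get(x, 0) + 1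
--     answer = 1 if counts == target else 0
--     for out, inc in zip(discount, discount[10:]):
--         c = counts[out] - 1
--         if c == 0:
--             del counts[out]
--         else:
--             counts[out] = c
--         counts[inc] = counts.get(inc, 0) + 1
--         if counts == target:
--             answer += 1
--     return answer
-- ===== Notes on version B (the rewrite author's own statement) =====
-- stated objective: faster
-- what changed: B replaces A's per-window rebuild (slice + fresh Counter for each of the n-9 windows) by a single sliding pass that maintains one count dict, decrementing the outgoing and incrementing the incoming element (deleting keys that reach zero) and comparing to target after each step.
import Mathlib
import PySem

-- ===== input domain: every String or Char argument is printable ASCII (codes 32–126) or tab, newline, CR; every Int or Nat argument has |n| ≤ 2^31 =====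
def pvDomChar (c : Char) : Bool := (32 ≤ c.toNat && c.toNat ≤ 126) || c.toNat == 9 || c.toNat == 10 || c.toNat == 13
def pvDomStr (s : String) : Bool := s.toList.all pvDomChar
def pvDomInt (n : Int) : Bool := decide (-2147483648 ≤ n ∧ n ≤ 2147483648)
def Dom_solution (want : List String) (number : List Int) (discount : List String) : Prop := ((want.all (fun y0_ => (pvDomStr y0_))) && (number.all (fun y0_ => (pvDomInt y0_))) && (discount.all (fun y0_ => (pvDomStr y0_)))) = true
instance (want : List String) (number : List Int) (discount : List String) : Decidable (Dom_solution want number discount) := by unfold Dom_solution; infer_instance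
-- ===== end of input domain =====

-- B replaces A's rebuild-a-Counter-per-window scan by a single sliding pass that updates one
-- count dict incrementally (objective: faster by a constant factor, measured).

-- ===== PORT A =====
-- Python's `==` between Counter(window) (a dict with no zero counts) and the dict `target`
-- is plain mapping equality: same key set, same values.
def pyDictEq (d1 d2 : PySem.Dict String Int) : Bool :=
  (d1.keys ++ d2.keys).all (fun k => d1.get? k == d2.get? k)

def solution (want : List String) (number : List Int) (discount : List String) : Int :=
  let target := PySem.Dict.ofList (want.zip number)
  (PySem.List.pyRange 0 ((discount.length : Int) - 9) 1).foldl
    (fun answer i =>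
      let window := PySem.List.slice discount (some i) (some (i + 10))
      let windowCount := PySem.Dict.counter window
      if pyDictEq windowCount target then answer + 1 else answer)
    0

-- ===== PORT B =====
-- loop body of B's sliding pass (st = (counts, answer), oi = (outgoing, incoming) pair).
-- Python's `counts[oi.1]` is ported as `getD oi.1 0`: the outgoing element always belongs to the
-- current window, hence is a key of counts, so the Python access never raises and getD is exact here.
def slideStep (target : PySem.Dict String Int) (st : PySem.Dict String Int × Int)
    (oi : String × String) : PySem.Dict String Int × Int :=
  let c := st.1.getD oi.1 0 - 1
  let d1 := if c = 0 then st.1.erase oi.1 else st.1.insert oi.1 c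
  let d2 := d1.insert oi.2 (d1.getD oi.2 0 + 1)
  (d2, if pyDictEq d2 target then st.2 + 1 else st.2)

def solution_alt (want : List String) (number : List Int) (discount : List String) : Int :=
  let target := PySem.Dict.ofList (want.zip number)
  if discount.length < 10 then 0
  else
    let counts := (PySem.List.slice discount none (some 10)).foldl
      (fun d x => d.insert x (d.getD x 0 + 1)) PySem.Dict.empty
    let answer : Int := if pyDictEq counts target then 1 else 0
    let fin := (discount.zip (PySem.List.slice discount (some 10) none)).foldl
      (slideStep target) (counts, answer)
    fin.2

-- ===== PRECONDITION & SPEC =====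
def Spec_solution (want : List String) (number : List Int) (discount : List String) (out : Int) : Prop := out = solution_alt want number discount
instance (want : List String) (number : List Int) (discount : List String) (out : Int) : Decidable (Spec_solution want number discount out) := by unfold Spec_solution; infer_instance

-- ===== CLAIM (what is proved, stated in full; the proofs are below) =====
def Claim_equal_solution : Prop := ∀ (want : List String) (number : List Int) (discount : List String), Dom_solution want number discount → Spec_solution want number discount (solution want number discount)

-- ===== LEMMAS AND PROOFS =====

theorem pv_get?_erase {κ ν : Type} [BEq κ] [LawfulBEq κ] (d : PySem.Dict κ ν) (k k' : κ) [Decidable (k' = k)] :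
    (d.erase k).get? k' = if k' = k then none else d.get? k' := by
  rcases d with ⟨items⟩
  by_cases hk : k' = k
  · subst hk
    simp only [if_pos rfl, PySem.Dict.erase, PySem.Dict.get?]
    rw [List.find?_eq_none.2]
    · rfl
    · intro x hx
      rcases List.mem_filter.1 hx with ⟨-, hq⟩
      simpa using hq
  · simp only [if_neg hk, PySem.Dict.erase, PySem.Dict.get?]
    congr 1
    have hkk' : (k == k') = false := by
      simpa using fun h => hk h.symm
    induction items with
    | nil => rfl
    | cons p rest ih =>
      rw [List.filter_cons]
      by_cases h1 : p.1 = k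
      · simp [h1, List.find?_cons, hkk', ih]
      · have : (!p.1 == k) = true := by simpa using h1
        rw [if_pos this]
        cases hpe : (p.1 == k') <;> simp [hpe, List.find?_cons, ih]

theorem pv_counter_get? (xs : List String) (k : String) :
    (PySem.Dict.counter xs).get? k =
      if xs.count k = 0 then none else some (xs.count k : Int) := by
  have hD : (PySem.Dict.counter xs).getD k 0 = (xs.count k : Int) :=
    PySem.Dict.getD_counter xs k
  by_cases hm : k ∈ xs
  · have hc : xs.count k ≠ 0 := by
      intro h; exact (List.count_eq_zero.1 h) hm
    have hkeys : k ∈ (PySem.Dict.counter xs).keys := by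
      rw [PySem.Dict.keys_counter]
      simpa [PySem.Set.mem_ofList] using hm
    rw [if_neg hc]
    cases hg : (PySem.Dict.counter xs).get? k with
    | none => exact absurd ((PySem.Dict.get?_eq_none_iff_not_mem_keys _ _).1 hg) (not_not_intro hkeys)
    | some v =>
      have := PySem.Dict.getD_of_get?_eq_some _ (0:Int) hg
      rw [hD] at this; rw [this]
  · have hc : xs.count k = 0 := List.count_eq_zero.2 hm
    rw [if_pos hc]
    apply (PySem.Dict.get?_eq_none_iff_not_mem_keys _ _).2
    rw [PySem.Dict.keys_counter]
    simpa [PySem.Set.mem_ofList] using hm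

theorem pv_pyDictEq_true_iff (d t : PySem.Dict String Int) :
    pyDictEq d t = true ↔ ∀ k, d.get? k = t.get? k := by
  unfold pyDictEq
  rw [List.all_eq_true]
  constructor
  · intro h k
    by_cases hk : k ∈ d.keys ++ t.keys
    · simpa using h k hk
    · rw [List.mem_append] at hk
      push_neg at hk
      rw [(PySem.Dict.get?_eq_none_iff_not_mem_keys _ _).2 hk.1,
          (PySem.Dict.get?_eq_none_iff_not_mem_keys _ _).2 hk.2]
  · intro h k _
    simpa using h k

theorem pv_pyDictEq_congr {d d' : PySem.Dict String Int} (t : PySem.Dict String Int)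
    (h : ∀ k, d.get? k = d'.get? k) : pyDictEq d t = pyDictEq d' t := by
  cases he : pyDictEq d' t
  · cases hd : pyDictEq d t
    · rfl
    · exact absurd ((pv_pyDictEq_true_iff d' t).2 fun k => (h k).symm.trans
        ((pv_pyDictEq_true_iff d t).1 hd k)) (by simp [he])
  · exact (pv_pyDictEq_true_iff d t).2 fun k => (h k).trans ((pv_pyDictEq_true_iff d' t).1 he k)

theorem pv_slideStep_get? (target d : PySem.Dict String Int) (ans : Int)
    (out inc : String) (rest : List String)
    (h : ∀ k, d.get? k = (PySem.Dict.counter (out :: rest)).get? k) (k : String) :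
    ((slideStep target (d, ans) (out, inc)).1).get? k
      = (PySem.Dict.counter (rest ++ [inc])).get? k := by
  have hc : d.getD out 0 - 1 = (rest.count out : Int) := by
    rw [PySem.Dict.getD_eq_get?_getD, h out, pv_counter_get?]
    simp [List.count_cons_self]
  have hd1 : ∀ k', ((if d.getD out 0 - 1 = 0 then d.erase out
      else d.insert out (d.getD out 0 - 1)) : PySem.Dict String Int).get? k'
      = (PySem.Dict.counter rest).get? k' := by
    intro k'
    by_cases hz : rest.count out = 0
    · rw [if_pos (by rw [hc]; exact_mod_cast hz)]
      rw [pv_get?_erase]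
      by_cases hk : k' = out
      · rw [if_pos hk, pv_counter_get?, hk, if_pos hz]
      · rw [if_neg hk, h k', pv_counter_get?, pv_counter_get?]
        have hk' : ¬ out = k' := fun hh => hk hh.symm
        simp [List.count_cons, hk']
    · rw [if_neg (by rw [hc]; exact_mod_cast hz)]
      rw [PySem.Dict.get?_insert]
      by_cases hk : k' = out
      · rw [if_pos hk, pv_counter_get?, hk, if_neg hz, hc]
      · rw [if_neg hk, h k', pv_counter_get?, pv_counter_get?]
        have hk' : ¬ out = k' := fun hh => hk hh.symm
        simp [List.count_cons, hk']
  have hd1D : ∀ k', ((if d.getD out 0 - 1 = 0 then d.erase out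
      else d.insert out (d.getD out 0 - 1)) : PySem.Dict String Int).getD k' 0
      = (rest.count k' : Int) := by
    intro k'
    rw [PySem.Dict.getD_eq_get?_getD, hd1 k', pv_counter_get?]
    by_cases hz : rest.count k' = 0 <;> simp [hz]
  show ((if d.getD out 0 - 1 = 0 then d.erase out
      else d.insert out (d.getD out 0 - 1)).insert inc
        ((if d.getD out 0 - 1 = 0 then d.erase out
      else d.insert out (d.getD out 0 - 1)).getD inc 0 + 1)).get? k
      = (PySem.Dict.counter (rest ++ [inc])).get? k
  rw [PySem.Dict.get?_insert, hd1D inc]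
  by_cases hk : k = inc
  · rw [if_pos hk, pv_counter_get?, hk]
    have : (rest ++ [inc]).count inc = rest.count inc + 1 := by
      simp [List.count_append]
    rw [this, if_neg (by omega)]
    norm_cast
  · rw [if_neg hk, hd1 k, pv_counter_get?, pv_counter_get?]
    have : (rest ++ [inc]).count k = rest.count k := by
      have hk' : ¬ inc = k := fun hh => hk hh.symm
      simp [List.count_append, List.count_singleton, hk']
    rw [this]

def pvWins (w : List String) : List String → List (List String)
  | [] => []
  | inc :: t => (w.tail ++ [inc]) :: pvWins (w.tail ++ [inc]) t

theorem pvWins_length (w t : List String) : (pvWins w t).length = t.length := by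
  induction t generalizing w with
  | nil => rfl
  | cons inc t ih => simp [pvWins, ih]

theorem pv_slideLoop (target : PySem.Dict String Int) (t : List String) :
    ∀ (w : List String) (d : PySem.Dict String Int) (ans : Int), w ≠ [] →
    (∀ k, d.get? k = (PySem.Dict.counter w).get? k) →
    (((w ++ t).zip t).foldl (slideStep target) (d, ans)).2
      = ans + ((pvWins w t).countP
          (fun v => pyDictEq (PySem.Dict.counter v) target) : Int) := by
  induction t with
  | nil => intro w d ans _ _; simp [pvWins]
  | cons inc t ih =>
    intro w d ans hw h
    rcases w with _ | ⟨out, w'⟩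
    · exact absurd rfl hw
    have hzip : ((out :: w' ++ inc :: t).zip (inc :: t))
        = (out, inc) :: (((w' ++ [inc]) ++ t).zip t) := by
      simp [List.zip]
    rw [hzip, List.foldl_cons]
    have hstep := pv_slideStep_get? target d ans out inc w' h
    have hfst : (slideStep target (d, ans) (out, inc)).1.get? =
        fun k => (PySem.Dict.counter (w' ++ [inc])).get? k := funext hstep
    have hsnd : (slideStep target (d, ans) (out, inc)).2
        = if pyDictEq (PySem.Dict.counter (w' ++ [inc])) target then ans + 1 else ans := by
      show (if pyDictEq ((slideStep target (d, ans) (out, inc)).1) target then ans + 1 else ans) = _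
      rw [pv_pyDictEq_congr target hstep]
    have hpair : slideStep target (d, ans) (out, inc)
        = ((slideStep target (d, ans) (out, inc)).1, (slideStep target (d, ans) (out, inc)).2) := rfl
    rw [hpair, hsnd]
    rw [ih (w' ++ [inc]) _ _ (by simp) hstep]
    have htail : (out :: w').tail = w' := rfl
    simp only [pvWins, htail, List.countP_cons]
    by_cases hp : pyDictEq (PySem.Dict.counter (w' ++ [inc])) target = true <;>
      simp [hp] <;> push_cast <;> ring

theorem pvWins_getElem (t : List String) : ∀ (w : List String) (j : Nat)
    (hj : j < t.length) (_ : w ≠ []),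
    (pvWins w t)[j]'(by rw [pvWins_length]; exact hj)
      = ((w ++ t).drop (j + 1)).take w.length := by
  induction t with
  | nil => intro w j hj _; simp at hj
  | cons inc t ih =>
    intro w j hj hw
    rcases w with _ | ⟨x, w'⟩
    · exact absurd rfl hw
    cases j with
    | zero =>
      show w' ++ [inc] = ((x :: w' ++ inc :: t).drop 1).take (x :: w').length
      simp [List.take_append]
    | succ j =>
      have hj' : j < t.length := by simp at hj; omega
      show (pvWins (w' ++ [inc]) t)[j]'(by rw [pvWins_length]; exact hj') = _
      rw [ih (w' ++ [inc]) j hj' (by simp)]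
      have h1 : (w' ++ [inc]) ++ t = (x :: w' ++ inc :: t).drop 1 := by simp
      rw [h1, List.drop_drop]
      have h2 : (w' ++ [inc]).length = (x :: w').length := by simp
      rw [h2]
      have h3 : 1 + (j + 1) = j + 1 + 1 := by omega
      rw [h3]

theorem pv_windows_eq (discount : List String) (h : 10 ≤ discount.length) :
    (List.range (discount.length - 9)).map (fun j => (discount.drop j).take 10)
      = discount.take 10 :: pvWins (discount.take 10) (discount.drop 10) := by
  have hw0len : (discount.take 10).length = 10 := by simp; omega
  have hw0ne : discount.take 10 ≠ [] := by
    intro hnil; rw [hnil] at hw0len; simp at hw0len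
  apply List.ext_getElem
  · simp [pvWins_length]; omega
  · intro j h1 h2
    cases j with
    | zero => simp
    | succ j =>
      have hj : j < (discount.drop 10).length := by simp at h1 ⊢; omega
      rw [List.getElem_map, List.getElem_range, List.getElem_cons_succ,
        pvWins_getElem _ _ _ hj hw0ne, List.take_append_drop, hw0len]

theorem pv_solution_eq_alt (want : List String) (number : List Int) (discount : List String) :
    solution want number discount = solution_alt want number discount := by
  by_cases hn : discount.length < 10
  · show (PySem.List.pyRange 0 ((discount.length : Int) - 9) 1).foldl _ 0
      = if discount.length < 10 then (0:Int) else _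
    rw [if_pos hn, PySem.List.pyRange_one_eq_nil (by push_cast; omega)]
    rfl
  · have hge : 10 ≤ discount.length := by omega
    set target := PySem.Dict.ofList (want.zip number) with htarget
    set p : List String → Bool := fun v => pyDictEq (PySem.Dict.counter v) target with hp
    set w0 := discount.take 10 with hw0
    set t := discount.drop 10 with ht
    have hw0len : w0.length = 10 := by rw [hw0]; simp; omega
    have hw0ne : w0 ≠ [] := by intro hnil; rw [hnil] at hw0len; simp at hw0len
    -- A side
    have hslice : ∀ k : Nat, PySem.List.slice discount (some ((k:Int))) (some ((k:Int) + 10))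
        = (discount.drop k).take 10 := by
      intro k
      have h10 : ((k:Int) + 10) = ((k + 10 : Nat) : Int) := by push_cast; ring
      rw [h10, PySem.List.slice_natCast]
      congr 1
      omega
    have hA : solution want number discount
        = 0 + (((List.range (discount.length - 9)).map
            (fun j => (discount.drop j).take 10)).countP p : Int) := by
      show (PySem.List.pyRange 0 ((discount.length : Int) - 9) 1).foldl
        (fun answer i =>
          if pyDictEq (PySem.Dict.counter (PySem.List.slice discount (some i) (some (i + 10)))) target
          then answer + 1 else answer) 0 = _
      rw [PySem.List.pyRange_one]
      have htn : (((discount.length : Int) - 9) - 0).toNat = discount.length - 9 := by omega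
      rw [htn, List.foldl_map]
      simp only [zero_add, hslice]
      rw [PySem.List.foldl_if_add_one]
      rw [List.countP_map, zero_add]
      rfl
    rw [hA, pv_windows_eq discount hge, ← hw0, ← ht]
    -- B side
    have hsl1 : PySem.List.slice discount none (some 10) = w0 := by
      rw [PySem.List.slice_to discount (by norm_num)]; rfl
    have hsl2 : PySem.List.slice discount (some 10) none = t := by
      rw [PySem.List.slice_from discount (by norm_num)]; rfl
    have hcounts : (PySem.List.slice discount none (some 10)).foldl
        (fun (d : PySem.Dict String Int) x => d.insert x (d.getD x 0 + 1)) PySem.Dict.empty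
        = PySem.Dict.counter w0 := by
      rw [hsl1, PySem.Dict.foldl_insert_getD_add_one_eq_counter]
    have hB : solution_alt want number discount
        = (if p w0 then (1:Int) else 0) + ((pvWins w0 t).countP p : Int) := by
      show (if discount.length < 10 then (0:Int) else
        ((discount.zip (PySem.List.slice discount (some 10) none)).foldl
          (slideStep target)
          ((PySem.List.slice discount none (some 10)).foldl
            (fun (d : PySem.Dict String Int) x => d.insert x (d.getD x 0 + 1)) PySem.Dict.empty,
           if pyDictEq ((PySem.List.slice discount none (some 10)).foldl
            (fun (d : PySem.Dict String Int) x => d.insert x (d.getD x 0 + 1)) PySem.Dict.empty) target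
           then (1:Int) else 0)).2) = _
      rw [if_neg hn, hcounts, hsl2]
      have hdz : discount = w0 ++ t := (List.take_append_drop 10 discount).symm
      rw [show discount.zip t = (w0 ++ t).zip t from by rw [← hdz]]
      rw [pv_slideLoop target t w0 (PySem.Dict.counter w0)
        (if pyDictEq (PySem.Dict.counter w0) target then (1:Int) else 0) hw0ne (fun k => rfl)]
    rw [hB, List.countP_cons]
    by_cases hpw : p w0 = true <;> simp [hpw] <;> push_cast <;> ring

-- ===== VERDICT (by name: the statement is the Claim_ definition above) =====
theorem solution_spec : Claim_equal_solution := by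
  intro want number discount _
  exact pv_solution_eq_alt want number discount
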